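-- pv_equiv track=rewrite | github.com/ToxicTrial/FireForces | main.py | suggest_unit_allocation
-- ===== SOURCE A (Python) =====
-- def suggest_unit_allocation(units_list, predictions):
--     """Рекомендует распределение подразделений по направлениям наиболее вероятного роста огня."""
--     if not predictions:
--         return {}
--
--     top_directions = [p["direction"] for p in predictions[:3]]
--     allocations = {d: [] for d in top_directions}
--     for idx, unit in enumerate(units_list):
--         direction = top_directions[idx % len(top_directions)]
--         allocations[direction].append(unit["name"])
--     return allocations
-- ===== SOURCE B (Python) =====
-- def suggest_unit_allocation(units_list, predictions):
--     """Same allocation, computed per direction: one filtered gather over the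
--     enumerated unit names for each distinct top direction."""
--     if not predictions:
--         return {}
--     top = [p["direction"] for p in predictions[:3]]
--     L = len(top)
--     names = [u["name"] for u in units_list]
--     return {d: [n for i, n in enumerate(names) if top[i % L] == d]
--             for d in dict.fromkeys(top)}
-- ===== Notes on version B (the rewrite author's own statement) =====
-- stated objective: alternative
-- what changed: Replaces A's single imperative loop that dispatches each unit into a mutable dict via idx % L appends with a per-direction construction: unit names are precomputed once and each distinct top direction gathers its units by filtering the enumerated names on index mod L.
import Mathlib
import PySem

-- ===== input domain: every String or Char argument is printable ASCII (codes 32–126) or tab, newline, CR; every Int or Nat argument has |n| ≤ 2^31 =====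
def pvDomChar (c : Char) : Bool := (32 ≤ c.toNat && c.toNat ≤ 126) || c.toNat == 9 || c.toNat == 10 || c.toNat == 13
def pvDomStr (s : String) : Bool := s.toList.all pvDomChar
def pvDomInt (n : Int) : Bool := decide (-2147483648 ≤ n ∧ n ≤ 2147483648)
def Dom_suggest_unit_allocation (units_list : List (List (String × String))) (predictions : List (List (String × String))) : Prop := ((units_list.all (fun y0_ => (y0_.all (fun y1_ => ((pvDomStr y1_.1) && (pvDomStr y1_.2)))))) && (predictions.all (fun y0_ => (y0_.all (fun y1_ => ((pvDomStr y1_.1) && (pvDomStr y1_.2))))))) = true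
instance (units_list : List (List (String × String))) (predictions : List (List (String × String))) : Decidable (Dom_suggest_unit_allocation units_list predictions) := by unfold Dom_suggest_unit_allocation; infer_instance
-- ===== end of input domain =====

-- B rebuilds the allocation per distinct direction by filtering enumerated unit names
-- on index mod L, instead of A's single modulo-dispatch loop appending into a dict.


-- ===== PORT A =====
def suggest_unit_allocation (units_list : List (List (String × String))) (predictions : List (List (String × String))) : List (String × List String) :=
  if predictions = [] then []
  else
    let top_directions := (PySem.List.slice predictions none (some 3)).map
      (fun p => ((PySem.Dict.mk p).get? "direction").getD "")
    let allocations : PySem.Dict String (List String) :=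
      top_directions.foldl (fun d k => d.insert k []) PySem.Dict.empty
    let final := (PySem.List.enumerate units_list).foldl
      (fun d p =>
        let direction := PySem.List.pyGetD top_directions (PySem.Int.mod p.1 (PySem.List.len top_directions)) ""
        d.modify direction [] (fun l => l ++ [((PySem.Dict.mk p.2).get? "name").getD ""]))
      allocations
    final.items

-- ===== PORT B =====
def suggest_unit_allocation_alt (units_list : List (List (String × String))) (predictions : List (List (String × String))) : List (String × List String) :=
  if predictions = [] then []
  else
    let top := (PySem.List.slice predictions none (some 3)).map
      (fun p => ((PySem.Dict.mk p).get? "direction").getD "")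
    let L := PySem.List.len top
    let names := units_list.map (fun u => ((PySem.Dict.mk u).get? "name").getD "")
    (PySem.List.dedup top).map (fun d =>
      (d, (PySem.List.enumerate names).filterMap
            (fun p => if PySem.List.pyGetD top (PySem.Int.mod p.1 L) "" == d then some p.2 else none)))

-- ===== PRECONDITION & SPEC =====
-- Pre_ excludes exactly the inputs where the Python A raises KeyError: a prediction in
-- predictions[:3] without a "direction" key, or (when predictions is nonempty) a unit
-- without a "name" key.
def Pre_suggest_unit_allocation (units_list : List (List (String × String))) (predictions : List (List (String × String))) : Prop :=
  predictions = [] ∨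
    ((∀ p ∈ PySem.List.slice predictions none (some 3), "direction" ∈ p.map Prod.fst) ∧
     (∀ u ∈ units_list, "name" ∈ u.map Prod.fst))
instance (units_list : List (List (String × String))) (predictions : List (List (String × String))) : Decidable (Pre_suggest_unit_allocation units_list predictions) := by unfold Pre_suggest_unit_allocation; infer_instance
def pvWitness_suggest_unit_allocation : (List (List (String × String))) × (List (List (String × String))) :=
  ([[("name", "engine1")], [("name", "engine2")]], [[("direction", "N")], [("direction", "E")]])

def Spec_suggest_unit_allocation (units_list : List (List (String × String))) (predictions : List (List (String × String))) (out : List (String × List String)) : Prop := out = suggest_unit_allocation_alt units_list predictions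
instance (units_list : List (List (String × String))) (predictions : List (List (String × String))) (out : List (String × List String)) : Decidable (Spec_suggest_unit_allocation units_list predictions out) := by unfold Spec_suggest_unit_allocation; infer_instance

-- ===== CLAIM (what is proved, stated in full; the proofs are below) =====
def Claim_equal_suggest_unit_allocation : Prop := ∀ (units_list : List (List (String × String))) (predictions : List (List (String × String))), Dom_suggest_unit_allocation units_list predictions → Pre_suggest_unit_allocation units_list predictions → Spec_suggest_unit_allocation units_list predictions (suggest_unit_allocation units_list predictions)

-- ===== LEMMAS AND PROOFS =====

lemma pv_getD_insert_nil (ks : List String) (d : PySem.Dict String (List String))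
    (h : ∀ k, d.getD k ([] : List String) = []) (k : String) :
    (ks.foldl (fun d k => d.insert k ([] : List String)) d).getD k [] = [] := by
  induction ks generalizing d with
  | nil => exact h k
  | cons a ks ih =>
      refine ih _ (fun k' => ?_)
      rw [PySem.Dict.getD_insert]
      split <;> simp [h]

lemma pv_items_eq_keys_map {κ ν : Type} [BEq κ] [LawfulBEq κ]
    (d : PySem.Dict κ ν) (v0 : ν) (h : d.keys.Nodup) :
    d.items = d.keys.map (fun k => (k, d.getD k v0)) := by
  simp only [PySem.Dict.keys, List.map_map]
  have : ∀ p ∈ d.items, ((fun k => (k, d.getD k v0)) ∘ Prod.fst) p = id p := by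
    intro p hp
    have := PySem.Dict.getD_of_mem_items (d := d) (k := p.1) (v := p.2) (d0 := v0)
      (by simpa using hp) h
    simp [this]
  rw [List.map_congr_left this, List.map_id]

lemma pv_set_update_self (S xs : List String) (h : ∀ x ∈ xs, x ∈ S) :
    PySem.Set.update S xs = S := by
  induction xs generalizing S with
  | nil => rfl
  | cons x xs ih =>
      have hx : PySem.Set.update S (x :: xs) = PySem.Set.update (PySem.Set.add S x) xs := rfl
      rw [hx, PySem.Set.add_of_mem (h x (by simp)), ih _ (fun y hy => h y (by simp [hy]))]

lemma pv_enumerate_map {α β : Type} (f : α → β) (xs : List α) (s : Int) :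
    PySem.List.enumerate (xs.map f) s = (PySem.List.enumerate xs s).map (fun p => (p.1, f p.2)) := by
  induction xs generalizing s with
  | nil => rfl
  | cons x xs ih => simp [PySem.List.enumerate_cons, ih]

lemma pv_filter_map_eq_filterMap {α β : Type} (l : List α) (p : α → Bool) (f : α → β) :
    (l.filter p).map f = l.filterMap (fun x => if p x then some (f x) else none) := by
  induction l with
  | nil => rfl
  | cons x xs ih => simp only [List.filter_cons, List.filterMap_cons]; split <;> simp [ih]

lemma pv_modify_loop {β : Type} (key : β → String) (val : β → String) (l : List β)
    (d : PySem.Dict String (List String)) (c : String) :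
    (l.foldl (fun d x => d.modify (key x) [] (fun v => v ++ [val x])) d).getD c []
      = d.getD c [] ++ (l.filter (fun x => key x == c)).map val := by
  have h := PySem.Dict.getD_foldl_modify_append (l.map (fun x => (key x, val x))) d c
  rw [List.foldl_map] at h
  simpa [List.filter_map, List.map_map, Function.comp] using h

lemma pv_main (units predictions : List (List (String × String))) :
    suggest_unit_allocation units predictions = suggest_unit_allocation_alt units predictions := by
  unfold suggest_unit_allocation suggest_unit_allocation_alt
  by_cases hP : predictions = []
  · simp [hP]
  · simp only [if_neg hP]
    set top := (PySem.List.slice predictions none (some 3)).map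
      (fun p => ((PySem.Dict.mk p).get? "direction").getD "") with htop
    set dir : Int → String := fun i => PySem.List.pyGetD top (PySem.Int.mod i (PySem.List.len top)) "" with hdir
    set nm : List (String × String) → String := fun u => ((PySem.Dict.mk u).get? "name").getD "" with hnm
    have hsl : PySem.List.slice predictions none (some 3) = predictions.take (3:Int).toNat :=
      PySem.List.slice_to _ (by norm_num)
    have htopne : top ≠ [] := by
      rw [htop, hsl]
      cases predictions with
      | nil => exact absurd rfl hP
      | cons a l => simp
    have hlen : (0:Int) < PySem.List.len top := by
      simp only [PySem.List.len_eq]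
      exact_mod_cast List.length_pos_iff.mpr htopne
    have hdirmem : ∀ i : Int, dir i ∈ top := by
      intro i
      exact PySem.List.pyGetD_mem _ _ (by
        constructor
        · have := PySem.Int.mod_nonneg i hlen
          simp only [PySem.List.len_eq] at this ⊢
          omega
        · have := PySem.Int.mod_lt i hlen
          simp only [PySem.List.len_eq] at this ⊢
          omega)
    set names := units.map nm with hnames
    set E := PySem.List.enumerate units 0 with hE
    set KEY : Int × List (String × String) → String :=
      fun p => PySem.List.pyGetD top (PySem.Int.mod p.1 (PySem.List.len top)) "" with hKEY
    set NM : Int × List (String × String) → String :=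
      fun p => ((PySem.Dict.mk p.2).get? "name").getD "" with hNM
    set KEY2 : Int × String → String :=
      fun p => PySem.List.pyGetD top (PySem.Int.mod p.1 (PySem.List.len top)) "" with hKEY2
    show (E.foldl (fun d p => d.modify (KEY p) [] (fun l => l ++ [NM p]))
        (top.foldl (fun d k => d.insert k []) PySem.Dict.empty)).items =
      (PySem.List.dedup top).map (fun d =>
        (d, (PySem.List.enumerate names).filterMap
              (fun p => if KEY2 p == d then some p.2 else none)))
    set alloc := top.foldl (fun d k => d.insert k ([] : List String)) PySem.Dict.empty with halloc
    have halloc_keys : alloc.keys = PySem.Set.ofList top := by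
      rw [halloc, PySem.Dict.keys_foldl_insert top (fun _ _ => ([] : List String)) PySem.Dict.empty,
        PySem.Dict.keys_empty, PySem.Set.ofList_eq_foldl]
      rfl
    have halloc_nodup : alloc.keys.Nodup := by
      rw [halloc]
      exact PySem.Dict.nodup_keys_foldl_insert top _ _ PySem.Dict.nodup_keys_empty
    have halloc_getD : ∀ k, alloc.getD k [] = [] := by
      intro k
      exact pv_getD_insert_nil top PySem.Dict.empty (fun _ => PySem.Dict.getD_empty _ _) k
    set F := (E.foldl (fun d p => d.modify (KEY p) [] (fun l => l ++ [NM p])) alloc) with hF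
    have hkeys : F.keys = PySem.Set.ofList top := by
      rw [hF, PySem.Dict.keys_foldl_modify_key E KEY [] (fun _ p => fun l => l ++ [NM p]) alloc,
        halloc_keys]
      apply pv_set_update_self
      intro x hx
      rw [List.mem_map] at hx
      obtain ⟨p, _, rfl⟩ := hx
      exact (PySem.Set.mem_ofList _ _).mpr (hdirmem p.1)
    have hnodup : F.keys.Nodup := by
      rw [hF]
      exact PySem.Dict.nodup_keys_foldl_modify_key E KEY [] _ alloc halloc_nodup
    have hgetD : ∀ c, F.getD c [] = (E.filter (fun p => KEY p == c)).map NM := by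
      intro c
      rw [hF, pv_modify_loop KEY NM E alloc c, halloc_getD, List.nil_append]
    rw [pv_items_eq_keys_map F ([] : List String) hnodup, hkeys, PySem.List.dedup_eq_ofList]
    apply List.map_congr_left
    intro d _
    rw [hgetD d]
    rw [hnames, pv_enumerate_map nm units 0, List.filterMap_map,
      pv_filter_map_eq_filterMap E (fun p => KEY p == d) NM]
    refine congrArg (fun l => (d, l)) ?_
    rw [← hE]
    apply List.filterMap_congr
    intro p _
    simp [hKEY, hKEY2, hNM, hnm, Function.comp]


-- ===== VERDICT (by name: the statement is the Claim_ definition above) =====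
theorem suggest_unit_allocation_spec : Claim_equal_suggest_unit_allocation := by
  intro units_list predictions _ _
  unfold Spec_suggest_unit_allocation
  exact pv_main units_list predictions
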